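-- pv_equiv track=rewrite | github.com/miliar/Code_Jam_Webscraper | solutions_python/solutions_year17_round0_nr3/210.py | compute
-- ===== SOURCE A (Python) =====
-- def compute(N, K):
--     length = N
--     long, short = 1, 0
--
--     while 2*(long + short) <= K:
--         if length % 2 == 1:
--             long = 2*long + short
--         else:
--             short = 2*short + long
--         length = length // 2
--
--     if K > 2*long+short-1:
--         length -= 1
--     return (length // 2, (length-1) // 2)
-- ===== SOURCE B (Python) =====
-- def compute(N, K):
--     # Closed-form tier computation: the K-th person sits in the tier of
--     # p = 2^t gaps where p <= K < 2p; those gaps have sizes q+1 (r of them)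
--     # and q, largest first, with q, r = divmod(N + 1 - p, p).
--     p = 1
--     while 2 * p <= K:
--         p *= 2
--     q, r = divmod(N + 1 - p, p)
--     g = q + 1 if K - p + 1 <= r else q
--     return (g // 2, (g - 1) // 2)
-- ===== Notes on version B (the rewrite author's own statement) =====
-- stated objective: alternative
-- what changed: A simulates the tier-splitting process with doubling long/short counters and a halving length; B jumps straight to the K-th person's tier p = 2^t (p <= K < 2p) and reads the gap size off one divmod(N+1-p, p), so the whole long/short state machine disappears.
-- outside the precondition, e.g. on compute(5, 0): A returns (2, 2), B returns (3, 2)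
import Mathlib
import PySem

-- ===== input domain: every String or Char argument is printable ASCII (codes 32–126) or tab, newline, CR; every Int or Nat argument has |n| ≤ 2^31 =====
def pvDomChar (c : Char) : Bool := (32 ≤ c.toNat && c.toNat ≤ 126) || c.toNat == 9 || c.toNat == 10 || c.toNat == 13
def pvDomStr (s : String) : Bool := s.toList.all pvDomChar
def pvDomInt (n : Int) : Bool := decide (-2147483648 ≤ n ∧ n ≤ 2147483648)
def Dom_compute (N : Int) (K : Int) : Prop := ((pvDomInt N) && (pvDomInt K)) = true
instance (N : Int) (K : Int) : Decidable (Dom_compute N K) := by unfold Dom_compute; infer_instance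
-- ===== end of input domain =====

-- B replaces A's long/short counter state machine by a direct jump to the K-th
-- person's tier p = 2^t and one divmod; alternative decomposition, same cost.

-- ===== PORT A =====
-- A's while-loop; the extra '0 < long + short' guard is a totality guard only:
-- Python diverges when it fails, and A always enters with long + short = 1.
def computeLoopA (length long short K : Int) : Int × Int :=
  if h : 2 * (long + short) ≤ K ∧ 0 < long + short then
    if PySem.Int.mod length 2 = 1 then
      computeLoopA (PySem.Int.floordiv length 2) (2 * long + short) short K
    else
      computeLoopA (PySem.Int.floordiv length 2) long (2 * short + long) K
  else
    let length' := if K > 2 * long + short - 1 then length - 1 else length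
    (PySem.Int.floordiv length' 2, PySem.Int.floordiv (length' - 1) 2)
termination_by (K + 1 - (long + short)).toNat
decreasing_by all_goals omega

def compute (N : Int) (K : Int) : Int × Int := computeLoopA N 1 0 K

-- ===== PORT B =====
-- Source B's 'while 2*p <= K: p *= 2'; '0 < p' is a totality guard only (Python
-- diverges when it fails; the loop starts at p = 1).
def computeP (p K : Int) : Int :=
  if h : 2 * p ≤ K ∧ 0 < p then computeP (2 * p) K else p
termination_by (K - p).toNat
decreasing_by omega

-- divmod(N + 1 - p, p) ported as the floordiv/mod pair (exact: p ≥ 1 here).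
def compute_alt (N : Int) (K : Int) : Int × Int :=
  let p := computeP 1 K
  let q := PySem.Int.floordiv (N + 1 - p) p
  let r := PySem.Int.mod (N + 1 - p) p
  let g := if K - p + 1 ≤ r then q + 1 else q
  (PySem.Int.floordiv g 2, PySem.Int.floordiv (g - 1) 2)

-- ===== PRECONDITION & SPEC =====
-- Pre_ restricts to the task's natural domain of at least one person (K ≥ 1);
-- on K ≤ 0 A still returns a value (the untouched corridor's middle gap) but a
-- person count K ≤ 0 is meaningless and B's tier formula does not apply there.
def Pre_compute (N : Int) (K : Int) : Prop := 1 ≤ K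
instance (N : Int) (K : Int) : Decidable (Pre_compute N K) := by unfold Pre_compute; infer_instance
def pvWitness_compute : Int × Int := (8, 3)
def Spec_compute (N : Int) (K : Int) (out : Int × Int) : Prop := out = compute_alt N K
instance (N : Int) (K : Int) (out : Int × Int) : Decidable (Spec_compute N K out) := by unfold Spec_compute; infer_instance

-- ===== CLAIM (what is proved, stated in full; the proofs are below) =====
def Claim_equal_compute : Prop := ∀ (N : Int) (K : Int), Dom_compute N K → Pre_compute N K → Spec_compute N K (compute N K)

-- ===== LEMMAS AND PROOFS =====

-- the tail of compute_alt, as a function of the tier size p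
def altBody (N K p : Int) : Int × Int :=
  let q := PySem.Int.floordiv (N + 1 - p) p
  let r := PySem.Int.mod (N + 1 - p) p
  let g := if K - p + 1 ≤ r then q + 1 else q
  (PySem.Int.floordiv g 2, PySem.Int.floordiv (g - 1) 2)

theorem compute_alt_eq (N K : Int) : compute_alt N K = altBody N K (computeP 1 K) := rfl

theorem computeP_step (p K : Int) (hp : 0 < p) (h : 2 * p ≤ K) :
    computeP p K = computeP (2 * p) K := by
  rw [computeP]; simp [hp, h]

theorem computeP_exit (p K : Int) (h : ¬ 2 * p ≤ K) : computeP p K = p := by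
  rw [computeP]; simp [h]

-- the loop-exit case: the current tier is the K-th person's tier
theorem exit_case (N K : Int) (t : ℕ) (len l s : Int)
    (hl : 1 ≤ l) (hs : 0 ≤ s) (hls : l + s = 2 ^ t)
    (hinv : l = N + 1 - 2 ^ t * len) (hK : 2 ^ t ≤ K)
    (hstop : ¬ 2 * (l + s) ≤ K) :
    computeLoopA len l s K = altBody N K (2 ^ t) := by
  have hP : (0 : Int) < 2 ^ t := by positivity
  rw [computeLoopA, dif_neg (by exact fun h => hstop h.1)]
  unfold altBody
  dsimp only
  rw [PySem.Int.floordiv_eq_ediv_of_pos hP, PySem.Int.mod_eq_emod_of_pos hP]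
  have hNP : N + 1 - 2 ^ t = l + 2 ^ t * (len - 1) := by linear_combination -hinv
  rw [hNP]
  rcases lt_or_eq_of_le (show l ≤ 2 ^ t by omega) with hlt | heq
  · have hq : (l + 2 ^ t * (len - 1)) / 2 ^ t = len - 1 := by
      rw [Int.add_mul_ediv_left _ _ (ne_of_gt hP),
        Int.ediv_eq_zero_of_lt (by omega) hlt]; ring
    have hr : (l + 2 ^ t * (len - 1)) % 2 ^ t = l := by
      rw [Int.add_mul_emod_self_left, Int.emod_eq_of_lt (by omega) hlt]
    rw [hq, hr]
    by_cases hK2 : 2 * l + s - 1 < K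
    · rw [if_pos hK2, if_neg (by omega)]
    · rw [if_neg hK2, if_pos (by omega)]
      have h1 : len - 1 + 1 = len := by ring
      rw [h1]
  · have h2 : l + 2 ^ t * (len - 1) = 2 ^ t * len := by rw [heq]; ring
    have hq : (l + 2 ^ t * (len - 1)) / 2 ^ t = len := by
      rw [h2, Int.mul_ediv_cancel_left _ (ne_of_gt hP)]
    have hr : (l + 2 ^ t * (len - 1)) % 2 ^ t = 0 := by
      rw [h2, Int.mul_emod_right]
    rw [hq, hr, if_neg (by omega), if_neg (by omega)]

theorem loop_lemma (N K : Int) : ∀ (m : ℕ) (t : ℕ) (len l s : Int),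
    (K - 2 ^ t).toNat ≤ m → 1 ≤ l → 0 ≤ s → l + s = 2 ^ t →
    l = N + 1 - 2 ^ t * len → (2 : Int) ^ t ≤ K →
    computeLoopA len l s K = altBody N K (computeP (2 ^ t) K) := by
  intro m
  induction m with
  | zero =>
    intro t len l s hm hl hs hls hinv hK
    have hp : (0 : Int) < 2 ^ t := by positivity
    have hstop : ¬ 2 * (l + s) ≤ K := by rw [hls]; omega
    rw [computeP_exit _ _ (by rw [← hls]; exact hstop)]
    exact exit_case N K t len l s hl hs hls hinv hK hstop
  | succ m ih =>
    intro t len l s hm hl hs hls hinv hK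
    have hp : (0 : Int) < 2 ^ t := by positivity
    by_cases hc : 2 * (l + s) ≤ K
    · -- one more tier: split every gap
      have hc' : 2 * (2 : Int) ^ t ≤ K := by rw [← hls]; exact hc
      have hpow : (2 : Int) ^ (t + 1) = 2 * 2 ^ t := by ring
      have hm' : (K - 2 ^ (t + 1)).toNat ≤ m := by rw [hpow]; omega
      have hK' : (2 : Int) ^ (t + 1) ≤ K := by rw [hpow]; omega
      rw [computeP_step _ _ (by omega) hc', computeLoopA]
      have hgd : 2 * (l + s) ≤ K ∧ 0 < l + s := ⟨hc, by omega⟩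
      rw [dif_pos hgd]
      have hdm := PySem.Int.floordiv_mul_add_mod len 2
      set d := PySem.Int.floordiv len 2 with hd
      set e := PySem.Int.mod len 2 with he
      have he01 : e = 0 ∨ e = 1 := by
        rcases PySem.Int.mod_two_eq len with h | h
        · left; rw [he, h]
        · right; rw [he, h]
      by_cases hodd : e = 1
      · rw [if_pos hodd]
        have := ih (t + 1) d (2 * l + s) s hm' (by omega) hs
          (by rw [hpow]; omega)
          (by rw [hpow]; linear_combination hinv + 2 ^ t * hdm - 2 ^ t * hodd + hls) hK'
        rw [← hpow]; exact this
      · have he0 : e = 0 := by tauto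
        rw [if_neg (by omega)]
        have := ih (t + 1) d l (2 * s + l) hm' hl (by omega)
          (by rw [hpow]; omega)
          (by rw [hpow]; linear_combination hinv + 2 ^ t * hdm - 2 ^ t * he0) hK'
        rw [← hpow]; exact this
    · rw [computeP_exit _ _ (by rw [← hls]; exact hc)]
      exact exit_case N K t len l s hl hs hls hinv hK hc

-- ===== VERDICT (by name: the statement is the Claim_ definition above) =====
theorem compute_spec : Claim_equal_compute := by
  intro N K _hDom hK
  unfold Spec_compute compute
  rw [compute_alt_eq]
  have h1 : (1 : Int) = 2 ^ (0 : ℕ) := by norm_num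
  calc computeLoopA N 1 0 K
      = altBody N K (computeP (2 ^ (0:ℕ)) K) := by
        exact loop_lemma N K (K - 2 ^ (0:ℕ)).toNat 0 N 1 0 le_rfl (by norm_num)
          (by norm_num) (by norm_num) (by push_cast; ring) (by simpa using hK)
    _ = altBody N K (computeP 1 K) := by norm_num
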